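-- pv_equiv track=rewrite | github.com/repardeimaj/Human_Intent_Prediction | sequence_model.py | subsample
-- ===== SOURCE A (Python) =====
-- def subsample(data, labels, factor):
--
--     new_data = []
--     new_labels = []
--     for i in range(len(data)):
--         j = 0
--         temp = []
--         for _ in range(factor):
--             temp.append([])
--
--         while j < int(len(data[i]) / factor) * factor:
--             for k in range(factor):
--                 temp[k].append(data[i][j + k])
--
--             j += factor
--
--         for l in range(factor):
--             new_data.append(temp[l])
--             new_labels.append(labels[i])
--
--     return new_data, new_labels
-- ===== SOURCE B (Python) =====
-- def subsample(data, labels, factor):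
--     # Column-major rewrite: build each deinterleaved subsequence in one stride
--     # slice instead of growing all factor lists element by element.
--     new_data = []
--     new_labels = []
--     for i in range(len(data)):
--         seq = data[i]
--         m = len(seq) // factor
--         for k in range(factor):
--             new_data.append(seq[k : m * factor : factor])
--             new_labels.append(labels[i])
--     return new_data, new_labels
-- ===== Notes on version B (the rewrite author's own statement) =====
-- stated objective: simpler
-- what changed: Replaces A's interleaved pass that grows all factor column lists element-by-element inside a manual while loop with a column-major construction that emits each deinterleaved subsequence as one stride slice seq[k : m*factor : factor].
import Mathlib
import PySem

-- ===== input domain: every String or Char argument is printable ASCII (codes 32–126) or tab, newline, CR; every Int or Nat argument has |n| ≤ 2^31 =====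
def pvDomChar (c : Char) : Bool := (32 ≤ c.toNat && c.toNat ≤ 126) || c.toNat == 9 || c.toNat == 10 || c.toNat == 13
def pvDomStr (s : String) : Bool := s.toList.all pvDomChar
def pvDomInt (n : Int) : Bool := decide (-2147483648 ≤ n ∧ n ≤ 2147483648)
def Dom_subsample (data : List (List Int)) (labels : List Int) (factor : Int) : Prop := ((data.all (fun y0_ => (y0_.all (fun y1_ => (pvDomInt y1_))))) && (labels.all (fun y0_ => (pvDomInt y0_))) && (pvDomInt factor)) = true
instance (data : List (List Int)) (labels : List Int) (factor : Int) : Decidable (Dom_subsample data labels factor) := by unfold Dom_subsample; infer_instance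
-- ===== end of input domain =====

-- B builds each deinterleaved subsequence as one stride slice (column-major) instead of
-- A's interleaved pass growing all factor lists at once; objective: simpler.

-- ===== PORT A =====
-- temp = []; for _ in range(factor): temp.append([])
def pvInitTemp (factor : Int) : List (List Int) :=
  (PySem.List.pyRange 0 factor 1).foldl (fun t _ => t ++ [[]]) []

-- the while loop: j starts at 0, steps by factor while j < bound; the fuel bounds the
-- iteration count (inside Pre_ the loop runs at most row.length times, so fuel
-- row.length + 1 is never exhausted where Python terminates).
-- temp[k].append(row[j+k]): both indexings are in range inside Pre_, so .set/.getD are exact there.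
def pvWhileA (row : List Int) (factor bound : Int) : Nat → Int → List (List Int) → List (List Int)
  | 0, _, temp => temp
  | fuel+1, j, temp =>
    if j < bound then
      pvWhileA row factor bound fuel (j + factor)
        ((PySem.List.pyRange 0 factor 1).foldl
          (fun t k => t.set k.toNat ((t.getD k.toNat []) ++ [(PySem.List.pyGet? row (j + k)).getD 0])) temp)
    else temp

def subsample (data : List (List Int)) (labels : List Int) (factor : Int) : List (List Int) × List Int :=
  (PySem.List.pyRange 0 data.length 1).foldl (fun acc i =>
    let row := (PySem.List.pyGet? data i).getD []
    -- int(len(row)/factor): float true division then truncation toward zero = Int.tdiv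
    -- (the float quotient is exact at these magnitudes)
    let bound := (Int.tdiv (row.length : Int) factor) * factor
    let temp := pvWhileA row factor bound (row.length + 1) 0 (pvInitTemp factor)
    (PySem.List.pyRange 0 factor 1).foldl (fun acc2 l =>
      (acc2.1 ++ [(PySem.List.pyGet? temp l).getD []],
       acc2.2 ++ [(PySem.List.pyGet? labels i).getD 0])) acc) ([], [])

-- ===== PORT B =====
-- hand port of the stride slice seq[k : m*factor : factor]: for 0 ≤ k < factor and
-- stop = m*factor ≤ len(seq) (the only way B uses it) it takes exactly m elements
-- k, k+factor, …, k+(m-1)*factor — exact there.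
def pvStrideTake (row : List Int) (start step : Int) : Nat → List Int
  | 0 => []
  | c+1 => (PySem.List.pyGet? row start).getD 0 :: pvStrideTake row (start + step) step c

def subsample_alt (data : List (List Int)) (labels : List Int) (factor : Int) : List (List Int) × List Int :=
  (PySem.List.pyRange 0 data.length 1).foldl (fun acc i =>
    let row := (PySem.List.pyGet? data i).getD []
    let m := PySem.Int.floordiv (row.length : Int) factor
    (PySem.List.pyRange 0 factor 1).foldl (fun acc2 k =>
      (acc2.1 ++ [pvStrideTake row k factor m.toNat],
       acc2.2 ++ [(PySem.List.pyGet? labels i).getD 0])) acc) ([], [])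

-- ===== PRECONDITION & SPEC =====
-- Pre_ = exactly where Python A returns normally: factor = 0 with nonempty data raises
-- ZeroDivisionError, factor < 0 with a row of length ≥ -factor loops forever, and
-- factor > 0 reads labels[i] for every i < len(data) (IndexError if labels is shorter).
def Pre_subsample (data : List (List Int)) (labels : List Int) (factor : Int) : Prop :=
  (0 < factor → data.length ≤ labels.length) ∧
  (factor = 0 → data = []) ∧
  (factor < 0 → ∀ row ∈ data, (row.length : Int) < -factor)
instance (data : List (List Int)) (labels : List Int) (factor : Int) : Decidable (Pre_subsample data labels factor) := by unfold Pre_subsample; infer_instance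

def pvWitness_subsample : List (List Int) × List Int × Int := ([[1,2,3,4],[5,6]], [10, 20], 2)

def Spec_subsample (data : List (List Int)) (labels : List Int) (factor : Int) (out : List (List Int) × List Int) : Prop := out = subsample_alt data labels factor
instance (data : List (List Int)) (labels : List Int) (factor : Int) (out : List (List Int) × List Int) : Decidable (Spec_subsample data labels factor out) := by unfold Spec_subsample; infer_instance

-- ===== CLAIM (what is proved, stated in full; the proofs are below) =====
def Claim_equal_subsample : Prop := ∀ (data : List (List Int)) (labels : List Int) (factor : Int), Dom_subsample data labels factor → Pre_subsample data labels factor → Spec_subsample data labels factor (subsample data labels factor)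

-- ===== LEMMAS AND PROOFS =====

theorem pvInitTemp_aux (L : List Int) (acc : List (List Int)) :
    L.foldl (fun t _ => t ++ [([] : List Int)]) acc = acc ++ List.replicate L.length [] := by
  induction L generalizing acc with
  | nil => simp
  | cons x xs ih =>
    rw [List.foldl_cons, ih, List.length_cons, List.replicate_succ]
    simp

theorem pvInitTemp_eq (factor : Int) :
    pvInitTemp factor = List.replicate factor.toNat [] := by
  rw [pvInitTemp, pvInitTemp_aux]
  simp [PySem.List.length_pyRange_one]

theorem pvInner_length (row : List Int) (j : Int) (L : List Int) (temp : List (List Int)) :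
    (L.foldl (fun t k => t.set k.toNat ((t.getD k.toNat []) ++ [(PySem.List.pyGet? row (j + k)).getD 0])) temp).length
    = temp.length := by
  induction L generalizing temp with
  | nil => rfl
  | cons x xs ih => rw [List.foldl_cons, ih, List.length_set]

-- pointwise description of the inner for-k fold
theorem pvInner_getD (row : List Int) (j : Int) :
    ∀ (n : Nat) (a b : Int) (temp : List (List Int)), (b - a).toNat = n → 0 ≤ a →
    b ≤ (temp.length : Int) → ∀ l : Nat,
    ((PySem.List.pyRange a b 1).foldl
      (fun t k => t.set k.toNat ((t.getD k.toNat []) ++ [(PySem.List.pyGet? row (j + k)).getD 0])) temp).getD l []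
    = (if a ≤ (l : Int) ∧ (l : Int) < b then temp.getD l [] ++ [(PySem.List.pyGet? row (j + (l : Int))).getD 0]
       else temp.getD l []) := by
  intro n
  induction n with
  | zero =>
    intro a b temp hn ha hb l
    rw [PySem.List.pyRange_one_eq_nil (by omega), List.foldl_nil, if_neg (by omega)]
  | succ m ih =>
    intro a b temp hn ha hb l
    rw [PySem.List.pyRange_one_cons (by omega), List.foldl_cons,
        ih (a+1) b _ (by omega) (by omega) (by rw [List.length_set]; exact hb)]
    by_cases h1 : (a+1) ≤ (l:Int) ∧ (l:Int) < b
    · rw [if_pos h1, if_pos (by omega)]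
      have hne : ¬ (a.toNat = l) := by omega
      simp [List.getD_eq_getElem?_getD, hne]
    · rw [if_neg h1]
      by_cases h2 : (l:Int) = a
      · have hl : a.toNat = l := by omega
        have hlt : a.toNat < temp.length := by omega
        rw [if_pos (by omega)]
        have hlt' : l < temp.length := hl ▸ hlt
        simp [List.getD_eq_getElem?_getD, hlt', ← h2]
      · rw [if_neg (by omega)]
        have hne : ¬ (a.toNat = l) := by omega
        simp [List.getD_eq_getElem?_getD, hne]

-- while-loop invariant: over t iterations, column l gains pvStrideTake row (j+l) factor t
theorem pvWhileA_getD (row : List Int) (factor : Int) (hf : 0 < factor) :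
    ∀ (t fuel : Nat) (j : Int) (temp : List (List Int)), t ≤ fuel → temp.length = factor.toNat →
    ∀ l : Nat, (l : Int) < factor →
    (pvWhileA row factor (j + (t : Int) * factor) fuel j temp).getD l []
      = temp.getD l [] ++ pvStrideTake row (j + (l : Int)) factor t := by
  intro t
  induction t with
  | zero =>
    intro fuel j temp ht hlen l hl
    cases fuel with
    | zero => simp [pvWhileA, pvStrideTake]
    | succ fu => simp [pvWhileA, pvStrideTake]
  | succ m ih =>
    intro fuel j temp ht hlen l hl
    cases fuel with
    | zero => omega
    | succ fu =>
      have hcond : j < j + ((m : Int) + 1) * factor := by nlinarith [Int.natCast_nonneg m]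
      have hb : j + ((m : Nat) + 1 : Int) * factor = (j + factor) + (m : Int) * factor := by ring
      simp only [pvWhileA, Nat.cast_add, Nat.cast_one]
      rw [if_pos hcond, hb,
          ih fu (j + factor) _ (by omega) (by rw [pvInner_length]; exact hlen),
          pvInner_getD row j factor.toNat 0 factor temp (by omega) (by omega) (by omega) l,
          if_pos (by constructor <;> omega)]
      have hs : pvStrideTake row (j + (l : Int)) factor (m + 1)
          = (PySem.List.pyGet? row (j + (l : Int))).getD 0
            :: pvStrideTake row ((j + factor) + (l : Int)) factor m := by
        rw [pvStrideTake]
        ring_nf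
      rw [hs, List.append_assoc]
      rfl
      · exact hl

-- tdiv and floordiv agree on a nonnegative length and positive factor
theorem pv_tdiv_fdiv (len : Nat) (f : Int) (hf : 0 < f) :
    Int.tdiv (len : Int) f = ((len / f.toNat : Nat) : Int)
    ∧ PySem.Int.floordiv (len : Int) f = ((len / f.toNat : Nat) : Int) := by
  have h : f = ((f.toNat : Nat) : Int) := by omega
  constructor
  · rw [h, ← Int.ofNat_tdiv]; simp
  · rw [PySem.Int.floordiv, h, ← Int.ofNat_fdiv]; simp

-- per-sequence step functions of the two ports agree
theorem subsample_step_eq (labels : List Int) (factor : Int)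
    (row : List Int) (i : Int) (acc : List (List Int) × List Int) :
    (PySem.List.pyRange 0 factor 1).foldl (fun acc2 l =>
      (acc2.1 ++ [(PySem.List.pyGet? (pvWhileA row factor ((Int.tdiv (row.length : Int) factor) * factor)
          (row.length + 1) 0 (pvInitTemp factor)) l).getD []],
       acc2.2 ++ [(PySem.List.pyGet? labels i).getD 0])) acc
    = (PySem.List.pyRange 0 factor 1).foldl (fun acc2 k =>
      (acc2.1 ++ [pvStrideTake row k factor (PySem.Int.floordiv (row.length : Int) factor).toNat],
       acc2.2 ++ [(PySem.List.pyGet? labels i).getD 0])) acc := by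
  refine PySem.List.foldl_congr_mem _ _ _ _ (fun acc2 k hk => ?_)
  obtain ⟨hk0, hkf⟩ := PySem.List.mem_pyRange_one.mp hk
  have hf : 0 < factor := by omega
  obtain ⟨htd, hfd⟩ := pv_tdiv_fdiv row.length factor hf
  have hknat : ((k.toNat : Nat) : Int) = k := by omega
  have hcol :
      (PySem.List.pyGet? (pvWhileA row factor ((Int.tdiv (row.length : Int) factor) * factor)
          (row.length + 1) 0 (pvInitTemp factor)) k).getD []
      = pvStrideTake row k factor (row.length / factor.toNat) := by
    have hbound : (Int.tdiv (row.length : Int) factor) * factor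
        = 0 + ((row.length / factor.toNat : Nat) : Int) * factor := by rw [htd]; ring
    rw [hbound]
    rw [PySem.List.pyGet?_of_nonneg _ hk0, ← List.getD_eq_getElem?_getD]
    rw [pvWhileA_getD row factor hf (row.length / factor.toNat) (row.length + 1) 0
          (pvInitTemp factor)
          (by have := Nat.div_le_self row.length factor.toNat; omega)
          (by rw [pvInitTemp_eq]; simp)
          k.toNat (by omega)]
    rw [pvInitTemp_eq, List.getD_replicate _ (by omega)]
    rw [zero_add, hknat]
    simp
  rw [hcol, hfd, Int.toNat_natCast]

-- ===== VERDICT (by name: the statement is the Claim_ definition above) =====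
theorem subsample_spec : Claim_equal_subsample := by
  intro data labels factor _ _
  unfold Spec_subsample subsample subsample_alt
  refine PySem.List.foldl_congr_mem _ _ _ _ (fun acc i _ => ?_)
  exact subsample_step_eq labels factor _ i acc
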